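-- pv_equiv track=rewrite | github.com/brasqo/itp-w1-create-box | create_box/main.py | create_box
-- ===== SOURCE A (Python) =====
-- def create_box(height, width, character):
--     if height < 1 and width < 1:
--         return "Both height and width are incorrect"
--     elif height < 1:
--         return 'Height is less than 1'
--     elif width < 1:
--         return 'Width is less than 1'
--     if not isinstance (character, str):
--         return 'Character is not a string'
--
--     mybox = ''
--     for i in range(height):
--         charizard = ''
--         for j in range(width):
--             charizard += character
--         mybox += charizard + '\n'
--
--     return mybox
-- ===== SOURCE B (Python) =====
-- def create_box(height, width, character):
--     if height < 1 and width < 1: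
--         return "Both height and width are incorrect"
--     elif height < 1:
--         return 'Height is less than 1'
--     elif width < 1:
--         return 'Width is less than 1'
--     if not isinstance(character, str):
--         return 'Character is not a string'
--     return height * (character * width + '\n')
-- ===== Notes on version B (the rewrite author's own statement) =====
-- stated objective: idiomatic
-- what changed: Replaced the nested char-by-char/row-by-row accumulation loops with a single closed-form string-repetition expression height * (character * width + '\n'); the guards are unchanged.
import Mathlib
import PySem

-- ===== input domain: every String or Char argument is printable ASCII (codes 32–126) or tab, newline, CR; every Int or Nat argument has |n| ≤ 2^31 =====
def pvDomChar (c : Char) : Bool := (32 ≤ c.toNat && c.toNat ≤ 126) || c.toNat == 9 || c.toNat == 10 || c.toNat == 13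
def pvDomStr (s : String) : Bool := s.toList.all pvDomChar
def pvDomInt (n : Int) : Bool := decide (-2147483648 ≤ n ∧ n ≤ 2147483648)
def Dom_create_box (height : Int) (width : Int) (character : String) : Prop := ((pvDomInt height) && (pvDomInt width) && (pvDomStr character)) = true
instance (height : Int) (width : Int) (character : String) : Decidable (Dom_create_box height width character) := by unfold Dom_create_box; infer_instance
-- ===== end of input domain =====

-- B builds the box by closed-form string repetition instead of A's nested accumulation loops (idiomatic).
-- Python's `isinstance(character, str)` guard is always false here (character : String), so it is omitted from both ports.

-- ===== PORT A =====
-- literal port: outer loop over range(height) appends row + '\n'; inner loop over range(width) appends character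
def create_box (height : Int) (width : Int) (character : String) : String :=
  if height < 1 ∧ width < 1 then "Both height and width are incorrect"
  else if height < 1 then "Height is less than 1"
  else if width < 1 then "Width is less than 1"
  else
    (PySem.List.pyRange 0 height 1).foldl
      (fun mybox _ =>
        mybox ++ ((PySem.List.pyRange 0 width 1).foldl (fun charizard _ => charizard ++ character) "") ++ "\n")
      ""

-- ===== PORT B =====
-- Python `n * s` for a string s and n ≥ 0 (repetition by structural recursion on the count)
def repStr : Nat → String → String
  | 0, _ => ""
  | n + 1, s => s ++ repStr n s

def pyStrMul (n : Int) (s : String) : String := repStr n.toNat s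

def create_box_alt (height : Int) (width : Int) (character : String) : String :=
  if height < 1 ∧ width < 1 then "Both height and width are incorrect"
  else if height < 1 then "Height is less than 1"
  else if width < 1 then "Width is less than 1"
  else pyStrMul height (pyStrMul width character ++ "\n")

-- ===== PRECONDITION & SPEC =====
def Spec_create_box (height : Int) (width : Int) (character : String) (out : String) : Prop := out = create_box_alt height width character
instance (height : Int) (width : Int) (character : String) (out : String) : Decidable (Spec_create_box height width character out) := by unfold Spec_create_box; infer_instance

-- ===== CLAIM (what is proved, stated in full; the proofs are below) =====
def Claim_equal_create_box : Prop := ∀ (height : Int) (width : Int) (character : String), Dom_create_box height width character → Spec_create_box height width character (create_box height width character)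

-- ===== LEMMAS AND PROOFS =====

-- folding `· ++ s` over any list appends `s` as many times as the list is long
theorem foldl_append_const {α : Type} (s : String) :
    ∀ (l : List α) (a : String), l.foldl (fun acc _ => acc ++ s) a = a ++ repStr l.length s
  | [], a => by simp [repStr]
  | x :: xs, a => by
    simp only [List.foldl, List.length_cons, repStr]
    rw [foldl_append_const s xs (a ++ s), String.append_assoc]

theorem create_box_eq_alt (height width : Int) (character : String) :
    create_box height width character = create_box_alt height width character := by
  unfold create_box create_box_alt
  split_ifs
  · rfl
  · rfl
  · rfl
  · rw [foldl_append_const]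
    simp only [String.append_assoc]
    rw [foldl_append_const]
    simp [pyStrMul, PySem.List.length_pyRange_one]

-- ===== VERDICT (by name: the statement is the Claim_ definition above) =====
theorem create_box_spec : Claim_equal_create_box := by
  intro h w c _
  unfold Spec_create_box
  exact create_box_eq_alt h w c
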